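-- pv_equiv track=rewrite | github.com/liuyeah/DKFND | model/dem_inv.py | train_data_shot
-- ===== SOURCE A (Python) =====
-- def train_data_shot(shot, train_data):
--     fake_num = shot
--     real_num = shot
--     train_news_index_list = []
--     for index, news in enumerate(train_data):
--         if news['label'] == 'fake' and fake_num > 0:
--             fake_num -= 1
--             train_news_index_list.append(index)
--         elif news['label'] == 'real' and real_num > 0:
--             real_num -= 1
--             train_news_index_list.append(index)
--     return train_news_index_list
-- ===== SOURCE B (Python) =====
-- def train_data_shot(shot, train_data):
--     k = max(shot, 0)
--     fake_idx = [i for i, n in enumerate(train_data) if n['label'] == 'fake'][:k]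
--     real_idx = [i for i, n in enumerate(train_data) if n['label'] == 'real'][:k]
--     return sorted(fake_idx + real_idx)
-- ===== Notes on version B (the rewrite author's own statement) =====
-- stated objective: alternative
-- what changed: Replaced the single counter-driven interleaved scan with two independent label-filtered comprehensions truncated to max(shot,0) indices each, recombined with sorted() to restore scan order.
import Mathlib
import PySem

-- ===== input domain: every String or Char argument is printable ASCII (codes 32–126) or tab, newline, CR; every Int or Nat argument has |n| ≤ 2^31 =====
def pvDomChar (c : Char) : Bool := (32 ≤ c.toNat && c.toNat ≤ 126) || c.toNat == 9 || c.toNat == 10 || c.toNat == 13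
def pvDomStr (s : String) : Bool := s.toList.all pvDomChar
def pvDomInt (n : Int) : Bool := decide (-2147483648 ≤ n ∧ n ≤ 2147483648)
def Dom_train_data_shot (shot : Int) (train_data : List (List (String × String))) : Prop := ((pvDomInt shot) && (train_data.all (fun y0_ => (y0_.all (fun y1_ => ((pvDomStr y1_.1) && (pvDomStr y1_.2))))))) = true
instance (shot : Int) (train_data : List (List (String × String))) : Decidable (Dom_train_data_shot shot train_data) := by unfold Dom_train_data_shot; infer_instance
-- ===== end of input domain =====

-- B differs from A by decomposition: two independent label-filtered passes (truncated to
-- max(shot,0) each) recombined with sorted(), instead of one counter-driven interleaved scan.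

-- ===== PORT A =====
-- news['label'] : first-match lookup in the association list (Python dict, unique keys)
def pvLabel (n : List (String × String)) : Option String := n.lookup "label"

-- the enumerate-loop of A: counters fake_num/real_num, running index i, appended indices
def pvALoop (f r i : Int) : List (List (String × String)) → List Int
  | [] => []
  | n :: rest =>
    if pvLabel n = some "fake" ∧ 0 < f then i :: pvALoop (f - 1) r (i + 1) rest
    else if pvLabel n = some "real" ∧ 0 < r then i :: pvALoop f (r - 1) (i + 1) rest
    else pvALoop f r (i + 1) rest

def train_data_shot (shot : Int) (train_data : List (List (String × String))) : List Int :=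
  pvALoop shot shot 0 train_data

-- ===== PORT B =====
def train_data_shot_alt (shot : Int) (train_data : List (List (String × String))) : List Int :=
  let k := max shot 0
  let fake_idx := (((PySem.List.enumerate train_data).filter
      (fun p => pvLabel p.2 = some "fake")).map (fun p => p.1)).take k.toNat
  let real_idx := (((PySem.List.enumerate train_data).filter
      (fun p => pvLabel p.2 = some "real")).map (fun p => p.1)).take k.toNat
  PySem.List.sorted (fake_idx ++ real_idx) (fun x => x) false

-- ===== PRECONDITION & SPEC =====
-- Pre_ excludes exactly the inputs where some news dict has no 'label' key, on which Python A raises KeyError.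
def Pre_train_data_shot (shot : Int) (train_data : List (List (String × String))) : Prop :=
  ∀ n ∈ train_data, (pvLabel n).isSome = true
instance (shot : Int) (train_data : List (List (String × String))) : Decidable (Pre_train_data_shot shot train_data) := by unfold Pre_train_data_shot; infer_instance

def pvWitness_train_data_shot : Int × (List (List (String × String))) :=
  (1, [[("label", "real")], [("label", "fake")]])

def Spec_train_data_shot (shot : Int) (train_data : List (List (String × String))) (out : List Int) : Prop := out = train_data_shot_alt shot train_data
instance (shot : Int) (train_data : List (List (String × String))) (out : List Int) : Decidable (Spec_train_data_shot shot train_data out) := by unfold Spec_train_data_shot; infer_instance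

-- ===== CLAIM (what is proved, stated in full; the proofs are below) =====
def Claim_equal_train_data_shot : Prop := ∀ (shot : Int) (train_data : List (List (String × String))), Dom_train_data_shot shot train_data → Pre_train_data_shot shot train_data → Spec_train_data_shot shot train_data (train_data_shot shot train_data)

-- ===== LEMMAS AND PROOFS =====

-- the indices (starting at s) of the entries labelled `lab`
def pvSel (lab : String) (s : Int) : List (List (String × String)) → List Int
  | [] => []
  | n :: rest => if pvLabel n = some lab then s :: pvSel lab (s + 1) rest else pvSel lab (s + 1) rest

lemma pvSel_eq_enumerate (lab : String) (s : Int) (td : List (List (String × String))) :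
    ((PySem.List.enumerate td s).filter (fun p => pvLabel p.2 = some lab)).map (fun p => p.1)
      = pvSel lab s td := by
  induction td generalizing s with
  | nil => simp [pvSel, PySem.List.enumerate_nil]
  | cons n rest ih =>
    simp only [PySem.List.enumerate_cons, List.filter_cons, pvSel]
    by_cases h : pvLabel n = some lab <;> simp [h, ih]

lemma pvALoop_lb (f r i : Int) (td : List (List (String × String))) :
    ∀ x ∈ pvALoop f r i td, i ≤ x := by
  induction td generalizing f r i with
  | nil => simp [pvALoop]
  | cons n rest ih =>
    intro x hx
    simp only [pvALoop] at hx
    split_ifs at hx with h1 h2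
    · rcases List.mem_cons.mp hx with h | h
      · omega
      · have := ih (f - 1) r (i + 1) x h; omega
    · rcases List.mem_cons.mp hx with h | h
      · omega
      · have := ih f (r - 1) (i + 1) x h; omega
    · have := ih f r (i + 1) x hx; omega

lemma pvALoop_pairwise (f r i : Int) (td : List (List (String × String))) :
    (pvALoop f r i td).Pairwise (· < ·) := by
  induction td generalizing f r i with
  | nil => simp [pvALoop]
  | cons n rest ih =>
    simp only [pvALoop]
    split_ifs with h1 h2
    · exact List.pairwise_cons.mpr ⟨fun x hx => by have := pvALoop_lb (f - 1) r (i + 1) rest x hx; omega, ih _ _ _⟩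
    · exact List.pairwise_cons.mpr ⟨fun x hx => by have := pvALoop_lb f (r - 1) (i + 1) rest x hx; omega, ih _ _ _⟩
    · exact ih _ _ _

lemma pvALoop_perm (f r i : Int) (td : List (List (String × String))) :
    (pvALoop f r i td).Perm
      ((pvSel "fake" i td).take f.toNat ++ (pvSel "real" i td).take r.toNat) := by
  induction td generalizing f r i with
  | nil => simp [pvALoop, pvSel]
  | cons n rest ih =>
    simp only [pvALoop, pvSel]
    by_cases hf : pvLabel n = some "fake"
    · have hr : ¬ pvLabel n = some "real" := by rw [hf]; simp
      by_cases hfp : (0:Int) < f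
      · have ht : f.toNat = (f - 1).toNat + 1 := by omega
        simp only [hf, hfp, and_self, if_true, ht, List.take_succ_cons]
        exact (ih (f - 1) r (i + 1)).cons i
      · have ht : f.toNat = 0 := by omega
        simp only [hf, hfp, and_false, if_false, ht, List.take_zero, List.nil_append]
        have := ih f r (i + 1)
        rw [ht] at this
        simpa using this
    · by_cases hrl : pvLabel n = some "real"
      · by_cases hrp : (0:Int) < r
        · have ht : r.toNat = (r - 1).toNat + 1 := by omega
          simp only [hrl, hrp, and_self, if_true, ht, List.take_succ_cons]
          exact ((ih f (r - 1) (i + 1)).cons i).trans List.perm_middle.symm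
        · have ht : r.toNat = 0 := by omega
          simp only [hrl, hrp, and_false, ht, List.take_zero, List.append_nil]
          have := ih f r (i + 1)
          rw [ht] at this
          simpa using this
      · simp only [hf, hrl, false_and, if_false]
        exact ih f r (i + 1)

lemma toNat_max (f : Int) : (max f 0).toNat = f.toNat := by omega

-- ===== VERDICT (by name: the statement is the Claim_ definition above) =====
theorem train_data_shot_spec : Claim_equal_train_data_shot := by
  intro shot td _hd _hp
  unfold Spec_train_data_shot train_data_shot train_data_shot_alt
  simp only [pvSel_eq_enumerate, toNat_max]
  exact (PySem.List.sorted_eq_of_perm_of_pairwise_lt _ _ _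
    (pvALoop_perm shot shot 0 td)
    (by simpa using pvALoop_pairwise shot shot 0 td)).symm
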